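-- pv_equiv track=rewrite | github.com/gweltou/ostilhou | ostilhou/text/definitions.py | reverse_mutation
-- ===== SOURCE A (Python) =====
-- from typing import List
--
-- def reverse_mutation(word: str) -> List[str]:
--     """ returns the list of possible reverse-mutated candidates
--         from a mutated (or not) word.
--         Note that many candidates won't have meaning
--     """
--     first_letter = word[0].lower()
--     is_cap = word[0].isupper()
--     candidates = []
--
--     if word.lower().startswith("c'h"):
--         candidates.append('k' + word[3:])
--         candidates.append('g' + word[3:])
--     elif first_letter == 'w':
--         candidates.append('g' + word[:])
--     elif first_letter == 'z':
--         candidates.append('t' + word[1:])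
--         candidates.append('d' + word[1:])
--     elif first_letter == 'f':
--         candidates.append('p' + word[1:])
--     elif first_letter == 'k':
--         candidates.append('g' + word[1:])
--     elif first_letter == 't':
--         candidates.append('d' + word[1:])
--     elif first_letter == 'p':
--         candidates.append('b' + word[1:])
--     elif first_letter == 'g':
--         candidates.append('k' + word[1:])
--     elif first_letter == 'd':
--         candidates.append('t' + word[1:])
--     elif first_letter == 'b':
--         candidates.append('p' + word[1:])
--     elif first_letter == 'v':
--         candidates.append('b' + word[1:])
--         candidates.append('m' + word[1:])
--
--     if is_cap:
--         candidates = [ w[0].upper() + w[1:] for w in candidates]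
--     return candidates
-- ===== SOURCE B (Python) =====
-- from typing import List
--
-- # Forward Breton consonant mutations, written as (mutated_prefix, original_prefix).
-- # Reversing a mutation = for every forward rule whose mutated form is a prefix of
-- # the (lowercased) word, replace that prefix by the original form.
-- FORWARD_RULES = [
--     ("c'h", "k"), ("c'h", "g"),
--     ("w", "gw"),
--     ("z", "t"), ("z", "d"),
--     ("f", "p"),
--     ("k", "g"),
--     ("t", "d"),
--     ("p", "b"),
--     ("g", "k"),
--     ("d", "t"),
--     ("b", "p"),
--     ("v", "b"),
--     ("v", "m"),
-- ]
--
-- def reverse_mutation(word: str) -> List[str]: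
--     low = word.lower()
--     candidates = [orig + word[len(mut):]
--                   for mut, orig in FORWARD_RULES if low.startswith(mut)]
--     if word[0].isupper():
--         candidates = [c[0].upper() + c[1:] for c in candidates]
--     return candidates
-- ===== Notes on version B (the rewrite author's own statement) =====
-- stated objective: alternative
-- what changed: Replaces A's eleven-branch if/elif dispatch on the first letter (plus the c'h special case) by a uniform scan over a flat table of forward mutation rules (mutated_prefix, original_prefix), emitting original + word[len(mutated):] for every rule whose mutated form prefixes the lowercased word.
-- intended difference: On words starting with uppercase 'W', A returns ['G' + word] keeping the raw capital 'W' in second position ('War' -> ['GWar'], an artifact of prepending 'g' to the unmodified word before the capitalization fixup), while B returns ['Gw' + word[1:]] ('War' -> ['Gwar']), the properly capitalized unmutated candidate that is intended. — e.g. on reverse_mutation("War"): A returns ["GWar"], B returns ["Gwar"]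
import Mathlib
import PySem

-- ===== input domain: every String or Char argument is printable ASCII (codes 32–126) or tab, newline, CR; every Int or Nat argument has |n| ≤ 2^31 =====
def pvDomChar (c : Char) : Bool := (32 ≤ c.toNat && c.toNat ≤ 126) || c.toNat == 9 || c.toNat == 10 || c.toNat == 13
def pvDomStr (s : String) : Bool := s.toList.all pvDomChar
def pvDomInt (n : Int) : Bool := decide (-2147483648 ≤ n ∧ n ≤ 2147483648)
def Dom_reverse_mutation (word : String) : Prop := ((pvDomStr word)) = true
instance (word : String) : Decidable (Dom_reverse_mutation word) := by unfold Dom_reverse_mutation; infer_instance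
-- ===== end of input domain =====

-- B replaces A's eleven-branch first-letter dispatch by a uniform scan over a flat table of
-- FORWARD mutation rules (mutated_prefix, original_prefix), emitting original + word[len(mutated):]
-- for every rule whose mutated form prefixes the lowercased word (objective: alternative).
-- On words starting with uppercase 'W' the two differ (see D_ below); return value only, no mutation.

-- ===== PORT A =====
-- the if/elif chain building `candidates` (cs = list(word), first_letter = word[0].lower())
def pvACandidates (cs : List Char) (first_letter : Char) : List (List Char) :=
  if PySem.Chars.startswith (PySem.Chars.lower cs) ['c', '\'', 'h'] then
    ['k' :: PySem.List.slice cs (some 3) none, 'g' :: PySem.List.slice cs (some 3) none]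
  else if first_letter = 'w' then ['g' :: PySem.List.slice cs none none]
  else if first_letter = 'z' then
    ['t' :: PySem.List.slice cs (some 1) none, 'd' :: PySem.List.slice cs (some 1) none]
  else if first_letter = 'f' then ['p' :: PySem.List.slice cs (some 1) none]
  else if first_letter = 'k' then ['g' :: PySem.List.slice cs (some 1) none]
  else if first_letter = 't' then ['d' :: PySem.List.slice cs (some 1) none]
  else if first_letter = 'p' then ['b' :: PySem.List.slice cs (some 1) none]
  else if first_letter = 'g' then ['k' :: PySem.List.slice cs (some 1) none]
  else if first_letter = 'd' then ['t' :: PySem.List.slice cs (some 1) none]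
  else if first_letter = 'b' then ['p' :: PySem.List.slice cs (some 1) none]
  else if first_letter = 'v' then
    ['b' :: PySem.List.slice cs (some 1) none, 'm' :: PySem.List.slice cs (some 1) none]
  else []

-- w[0].upper() + w[1:] of the is_cap fixup (both Pythons use this exact expression);
-- exact for the nonempty strings it is applied to
def pvCapFix (w : List Char) : List Char :=
  match w with
  | [] => []
  | a :: r => PySem.Chars.upperChar a :: r

def reverse_mutation (word : String) : List String :=
  match word.toList with
  | [] => []   -- word[0] raises IndexError; excluded by Pre_
  | c0 :: _ =>
    (if PySem.Chars.isupper c0 then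
      (pvACandidates word.toList (PySem.Chars.lowerChar c0)).map pvCapFix
     else
      pvACandidates word.toList (PySem.Chars.lowerChar c0)).map String.ofList

-- ===== PORT B =====
-- FORWARD_RULES of Source B: forward Breton mutations as (mutated_prefix, original_prefix)
def pvForwardRules : List (List Char × List Char) :=
  [ (['c', '\'', 'h'], ['k']), (['c', '\'', 'h'], ['g']),
    (['w'], ['g', 'w']),
    (['z'], ['t']), (['z'], ['d']),
    (['f'], ['p']),
    (['k'], ['g']),
    (['t'], ['d']),
    (['p'], ['b']),
    (['g'], ['k']),
    (['d'], ['t']),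
    (['b'], ['p']),
    (['v'], ['b']),
    (['v'], ['m']) ]

def reverse_mutation_alt (word : String) : List String :=
  let cs := word.toList
  let low := PySem.Chars.lower cs
  -- [orig + word[len(mut):] for mut, orig in FORWARD_RULES if low.startswith(mut)]
  let candidates :=
    (pvForwardRules.filter (fun r => PySem.Chars.startswith low r.1)).map
      (fun r => r.2 ++ cs.drop r.1.length)
  match cs with
  | [] => []   -- word[0].isupper() raises IndexError; excluded by Pre_
  | c0 :: _ =>
    (if PySem.Chars.isupper c0 then candidates.map pvCapFix else candidates).map String.ofList

-- ===== PRECONDITION & SPEC =====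
-- Pre_ excludes only the empty string, on which A raises IndexError (word[0]).
def Pre_reverse_mutation (word : String) : Prop := word ≠ ""
instance (word : String) : Decidable (Pre_reverse_mutation word) := by
  unfold Pre_reverse_mutation; infer_instance
def pvWitness_reverse_mutation : String := "zebra"

-- On words starting with uppercase 'W', A returns ['G' + word], keeping the original capital 'W'
-- as second letter ("War" -> ["GWar"], an artifact of prepending to the unmodified word before the
-- capitalization fixup), while B returns ['Gw' + word[1:]] ("War" -> ["Gwar"]), the properly
-- capitalized unmutated candidate a maintainer would intend.
def D_reverse_mutation (word : String) : Prop := word.toList.head? = some 'W'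
instance (word : String) : Decidable (D_reverse_mutation word) := by
  unfold D_reverse_mutation; infer_instance

def Spec_reverse_mutation (word : String) (out : List String) : Prop :=
  ¬ D_reverse_mutation word → out = reverse_mutation_alt word
instance (word : String) (out : List String) : Decidable (Spec_reverse_mutation word out) := by
  unfold Spec_reverse_mutation; infer_instance

def pvDiffWitness_reverse_mutation : String := "War"
def pvDiffWitnessOut_reverse_mutation : (List String) × (List String) := (["GWar"], ["Gwar"])

-- ===== CLAIM (what is proved, stated in full; the proofs are below) =====
def Claim_unchanged_reverse_mutation : Prop := ∀ (word : String), Dom_reverse_mutation word → Pre_reverse_mutation word → Spec_reverse_mutation word (reverse_mutation word)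
def Claim_changed_reverse_mutation : Prop := Dom_reverse_mutation (pvDiffWitness_reverse_mutation) ∧ Pre_reverse_mutation (pvDiffWitness_reverse_mutation) ∧ D_reverse_mutation (pvDiffWitness_reverse_mutation) ∧ reverse_mutation (pvDiffWitness_reverse_mutation) = pvDiffWitnessOut_reverse_mutation.1 ∧ reverse_mutation_alt (pvDiffWitness_reverse_mutation) = pvDiffWitnessOut_reverse_mutation.2 ∧ pvDiffWitnessOut_reverse_mutation.1 ≠ pvDiffWitnessOut_reverse_mutation.2
def Claim_exact_reverse_mutation : Prop := ∀ (word : String), Dom_reverse_mutation word → Pre_reverse_mutation word → D_reverse_mutation word → reverse_mutation word ≠ reverse_mutation_alt word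

-- ===== LEMMAS AND PROOFS =====

lemma pvStartswithSingleton (x : Char) (xs : List Char) (p : Char) :
    PySem.Chars.startswith (x :: xs) [p] = (x == p) := by
  simp [PySem.Chars.startswith, List.isPrefixOf, eq_comm]

-- lowerChar only maps 'W' (besides 'w' itself) to 'w'
lemma pvLowerW (c : Char) (h : PySem.Chars.lowerChar c = 'w') (hW : c ≠ 'W') : c = 'w' := by
  unfold PySem.Chars.lowerChar PySem.Chars.isupper at h
  split at h
  · next hc =>
    simp only [Bool.and_eq_true, decide_eq_true_eq] at hc
    have h1 : (65 : Nat) ≤ c.toNat := Nat.succ_le_of_lt hc.1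
    have h2 : c.toNat ≤ 90 := hc.2
    have h3 : (Char.ofNat (c.toNat + 32)).toNat = c.toNat + 32 := by
      rw [Char.toNat_ofNat]
      exact if_pos (Or.inl (by omega))
    have h4 := congrArg Char.toNat h
    rw [h3] at h4
    have hw : ('w' : Char).toNat = 119 := rfl
    rw [hw] at h4
    have h5 : c.toNat = 87 := by omega
    exact absurd (Char.ext (UInt32.toNat_inj.mp (show c.val.toNat = ('W' : Char).val.toNat from h5))) hW
  · exact h

-- A's candidate chain equals B's forward-rule scan, outside D_ (first char not 'W')
lemma pvCore (c0 : Char) (rest : List Char) (hW : c0 ≠ 'W') :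
    pvACandidates (c0 :: rest) (PySem.Chars.lowerChar c0)
      = (pvForwardRules.filter
          (fun r => PySem.Chars.startswith (PySem.Chars.lower (c0 :: rest)) r.1)).map
          (fun r => r.2 ++ (c0 :: rest).drop r.1.length) := by
  have hlow : PySem.Chars.lower (c0 :: rest)
      = PySem.Chars.lowerChar c0 :: PySem.Chars.lower rest := by
    simp [PySem.Chars.lower]
  have s1 : PySem.List.slice (c0 :: rest) (some 1) none = rest := by
    rw [PySem.List.slice_from _ (by omega : (0:Int) ≤ 1)]; rfl
  have s3 : PySem.List.slice (c0 :: rest) (some 3) none = (c0 :: rest).drop 3 := by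
    rw [PySem.List.slice_from _ (by omega : (0:Int) ≤ 3)]; rfl
  unfold pvACandidates
  rw [hlow]
  by_cases hch : PySem.Chars.startswith
      (PySem.Chars.lowerChar c0 :: PySem.Chars.lower rest) ['c', '\'', 'h'] = true
  · have hc : PySem.Chars.lowerChar c0 = 'c' := by
      simp [PySem.Chars.startswith, List.isPrefixOf] at hch
      exact hch.1.symm
    rw [hc] at hch
    simp [hch, hc, s3, pvForwardRules, List.filter, pvStartswithSingleton]
  · by_cases hw : PySem.Chars.lowerChar c0 = 'w'
    · have hc0 : c0 = 'w' := pvLowerW c0 hw hW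
      subst hc0
      rw [hw] at hch
      simp [hch, hw, pvForwardRules, List.filter, pvStartswithSingleton,
        PySem.List.slice_none_none]
    · by_cases hz : PySem.Chars.lowerChar c0 = 'z'
      · rw [hz] at hch
        simp [hch, hz, s1, pvForwardRules, List.filter, pvStartswithSingleton]
      · by_cases hf : PySem.Chars.lowerChar c0 = 'f'
        · rw [hf] at hch
          simp [hch, hf, s1, pvForwardRules, List.filter, pvStartswithSingleton]
        · by_cases hk : PySem.Chars.lowerChar c0 = 'k'
          · rw [hk] at hch
            simp [hch, hk, s1, pvForwardRules, List.filter, pvStartswithSingleton]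
          · by_cases ht : PySem.Chars.lowerChar c0 = 't'
            · rw [ht] at hch
              simp [hch, ht, s1, pvForwardRules, List.filter, pvStartswithSingleton]
            · by_cases hp : PySem.Chars.lowerChar c0 = 'p'
              · rw [hp] at hch
                simp [hch, hp, s1, pvForwardRules, List.filter, pvStartswithSingleton]
              · by_cases hg : PySem.Chars.lowerChar c0 = 'g'
                · rw [hg] at hch
                  simp [hch, hg, s1, pvForwardRules, List.filter, pvStartswithSingleton]
                · by_cases hd : PySem.Chars.lowerChar c0 = 'd'
                  · rw [hd] at hch
                    simp [hch, hd, s1, pvForwardRules, List.filter, pvStartswithSingleton]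
                  · by_cases hb : PySem.Chars.lowerChar c0 = 'b'
                    · rw [hb] at hch
                      simp [hch, hb, s1, pvForwardRules, List.filter, pvStartswithSingleton]
                    · by_cases hv : PySem.Chars.lowerChar c0 = 'v'
                      · rw [hv] at hch
                        simp [hch, hv, s1, pvForwardRules, List.filter, pvStartswithSingleton]
                      · simp [hch, hw, hz, hf, hk, ht, hp, hg, hd, hb, hv,
                          pvForwardRules, List.filter, pvStartswithSingleton,
                          beq_eq_false_iff_ne.mpr hw, beq_eq_false_iff_ne.mpr hz,
                          beq_eq_false_iff_ne.mpr hf, beq_eq_false_iff_ne.mpr hk,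
                          beq_eq_false_iff_ne.mpr ht, beq_eq_false_iff_ne.mpr hp,
                          beq_eq_false_iff_ne.mpr hg, beq_eq_false_iff_ne.mpr hd,
                          beq_eq_false_iff_ne.mpr hb, beq_eq_false_iff_ne.mpr hv]

-- ===== VERDICT (by name: the statements are the Claim_ definitions above) =====
set_option maxHeartbeats 1000000 in
theorem reverse_mutation_spec : Claim_unchanged_reverse_mutation := by
  intro word _ hpre
  unfold Spec_reverse_mutation
  intro hD
  unfold reverse_mutation reverse_mutation_alt
  cases h : word.toList with
  | nil => exact absurd (by simpa using congrArg String.ofList h) hpre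
  | cons c0 rest =>
    have hW : c0 ≠ 'W' := by
      intro hc; apply hD; unfold D_reverse_mutation; rw [h, hc]; rfl
    dsimp only
    rw [pvCore c0 rest hW]

set_option maxHeartbeats 1000000 in
theorem reverse_mutation_changed : Claim_changed_reverse_mutation := by
  unfold Claim_changed_reverse_mutation; decide

set_option maxHeartbeats 1000000 in
theorem reverse_mutation_tight : Claim_exact_reverse_mutation := by
  intro word _ _ hD
  unfold D_reverse_mutation at hD
  unfold reverse_mutation reverse_mutation_alt
  cases h : word.toList with
  | nil => rw [h] at hD; exact absurd hD (by simp)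
  | cons c0 rest =>
    rw [h] at hD
    have hc0 : c0 = 'W' := by simpa using hD
    subst hc0
    dsimp only
    intro hcon
    simp [pvACandidates, pvForwardRules, PySem.Chars.lower, PySem.Chars.lowerChar,
      PySem.Chars.isupper, PySem.Chars.upperChar, pvCapFix,
      PySem.Chars.startswith, List.isPrefixOf, PySem.List.slice_none_none, List.filter] at hcon
    have hlists := congrArg String.toList hcon
    simp [PySem.Chars.islower] at hlists
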